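-- pv_equiv track=rewrite | github.com/probix89-gif/SQL-TESTING | bot.py | active_category_summary
-- ===== SOURCE A (Python) =====
-- from typing import List, Set, Optional, Dict, Any
--
-- TEMPLATE_CATEGORIES: Dict[str, List[str]] = {
--     "admin": ["T01", "T02", "T03", "T04", "T05", "T06"],
--     "login": ["T07", "T08", "T09", "T10"],
--     "files": ["T11", "T12", "T13", "T14"],
--     "cms":   ["T15", "T16", "T17", "T18"],
--     "error": ["T19", "T20"],
-- }
--
-- CATEGORY_LABELS: Dict[str, str] = {
--     "admin": "🟠 Admin/Panel",
--     "login": "🟡 Login Pages",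
--     "files": "🟢 File Exposure",
--     "cms":   "🔵 CMS-Specific",
--     "error": "🟣 Error/Debug",
-- }
--
-- def active_category_summary(cfg: Dict[str, Any]) -> str:
--     """Return a compact string showing active template count per category."""
--     enabled = set(cfg.get("templates", []))
--     lines = []
--     for cat, tids in TEMPLATE_CATEGORIES.items():
--         active = [t for t in tids if t in enabled]
--         if active:
--             lines.append(f"  {CATEGORY_LABELS[cat]}: {len(active)}/{len(tids)} templates")
--     return "\n".join(lines) if lines else "  (none)"
-- ===== SOURCE B (Python) =====
-- from typing import List, Dict, Any
--
-- TEMPLATE_CATEGORIES: Dict[str, List[str]] = {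
--     "admin": ["T01", "T02", "T03", "T04", "T05", "T06"],
--     "login": ["T07", "T08", "T09", "T10"],
--     "files": ["T11", "T12", "T13", "T14"],
--     "cms":   ["T15", "T16", "T17", "T18"],
--     "error": ["T19", "T20"],
-- }
--
-- CATEGORY_LABELS: Dict[str, str] = {
--     "admin": "🟠 Admin/Panel",
--     "login": "🟡 Login Pages",
--     "files": "🟢 File Exposure",
--     "cms":   "🔵 CMS-Specific",
--     "error": "🟣 Error/Debug",
-- }
--
-- # reverse lookup: template id -> its category (constants, built once)
-- _TID_TO_CAT: Dict[str, str] = {t: cat for cat, tids in TEMPLATE_CATEGORIES.items() for t in tids}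
--
-- def active_category_summary(cfg: Dict[str, Any]) -> str:
--     """Return a compact string showing active template count per category."""
--     counts: Dict[str, int] = {cat: 0 for cat in TEMPLATE_CATEGORIES}
--     for t in set(cfg.get("templates", [])):
--         cat = _TID_TO_CAT.get(t)
--         if cat is not None:
--             counts[cat] += 1
--     lines = []
--     for cat, tids in TEMPLATE_CATEGORIES.items():
--         n = counts[cat]
--         if n:
--             lines.append(f"  {CATEGORY_LABELS[cat]}: {n}/{len(tids)} templates")
--     return "\n".join(lines) if lines else "  (none)"
-- ===== Notes on version B (the rewrite author's own statement) =====
-- stated objective: alternative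
-- what changed: B replaces A's per-category filtering of each template-id list against the enabled set with a constant reverse lookup (template id -> category) and a single counting pass over the enabled set, then emits lines from the per-category counters in TEMPLATE_CATEGORIES order.
import Mathlib
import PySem

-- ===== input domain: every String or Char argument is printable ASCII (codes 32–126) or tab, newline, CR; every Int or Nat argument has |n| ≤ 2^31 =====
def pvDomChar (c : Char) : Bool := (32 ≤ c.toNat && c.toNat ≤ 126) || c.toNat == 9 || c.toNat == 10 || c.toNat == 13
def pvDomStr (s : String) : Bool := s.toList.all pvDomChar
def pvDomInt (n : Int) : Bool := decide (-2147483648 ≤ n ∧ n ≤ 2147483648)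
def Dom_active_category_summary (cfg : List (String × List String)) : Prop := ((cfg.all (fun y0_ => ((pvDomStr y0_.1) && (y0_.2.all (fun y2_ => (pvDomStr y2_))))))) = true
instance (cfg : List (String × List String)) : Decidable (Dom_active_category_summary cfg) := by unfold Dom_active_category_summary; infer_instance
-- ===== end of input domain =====

-- B replaces A's per-category filter of the template-id lists with a constant reverse
-- lookup (template id -> category) and one counting pass over the enabled set
-- (objective: alternative decomposition; same observable behaviour).

-- ===== PORT A =====

-- module constant TEMPLATE_CATEGORIES (insertion order)
def pvCats : List (String × List String) :=
  [("admin", ["T01", "T02", "T03", "T04", "T05", "T06"]),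
   ("login", ["T07", "T08", "T09", "T10"]),
   ("files", ["T11", "T12", "T13", "T14"]),
   ("cms",   ["T15", "T16", "T17", "T18"]),
   ("error", ["T19", "T20"])]

-- module constant CATEGORY_LABELS
def pvLabels : PySem.Dict String String :=
  PySem.Dict.mk
    [("admin", "🟠 Admin/Panel"),
     ("login", "🟡 Login Pages"),
     ("files", "🟢 File Exposure"),
     ("cms",   "🔵 CMS-Specific"),
     ("error", "🟣 Error/Debug")]

-- the f-string "  {CATEGORY_LABELS[cat]}: {na}/{nt} templates" (KeyError impossible: cat is a key of the constants)
def pvLine (cat : String) (na nt : Int) : String :=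
  "  " ++ (PySem.Dict.getD pvLabels cat "") ++ ": " ++ PySem.Int.toStr na ++ "/" ++ PySem.Int.toStr nt ++ " templates"

def active_category_summary (cfg : List (String × List String)) : String :=
  let enabled : PySem.Set String := PySem.Set.ofList (PySem.Dict.getD (PySem.Dict.mk cfg) "templates" [])
  let lines : List String := pvCats.foldl (fun lines p =>
    let active := p.2.filter (fun t => PySem.Set.contains enabled t)
    if active ≠ [] then lines ++ [pvLine p.1 (active.length : Int) (p.2.length : Int)] else lines) []
  if lines ≠ [] then PySem.Str.join "\n" lines else "  (none)"

-- ===== PORT B =====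

-- module constant _TID_TO_CAT: the dict comprehension over the constants, written out
def pvTidToCat : PySem.Dict String String :=
  PySem.Dict.mk
    [("T01", "admin"), ("T02", "admin"), ("T03", "admin"), ("T04", "admin"), ("T05", "admin"), ("T06", "admin"),
     ("T07", "login"), ("T08", "login"), ("T09", "login"), ("T10", "login"),
     ("T11", "files"), ("T12", "files"), ("T13", "files"), ("T14", "files"),
     ("T15", "cms"), ("T16", "cms"), ("T17", "cms"), ("T18", "cms"),
     ("T19", "error"), ("T20", "error")]

-- {cat: 0 for cat in TEMPLATE_CATEGORIES}
def pvInitCounts : PySem.Dict String Int :=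
  PySem.Dict.mk [("admin", 0), ("login", 0), ("files", 0), ("cms", 0), ("error", 0)]

def active_category_summary_alt (cfg : List (String × List String)) : String :=
  let enabled : PySem.Set String := PySem.Set.ofList (PySem.Dict.getD (PySem.Dict.mk cfg) "templates" [])
  -- counting pass over the set; the resulting dict is only looked up afterwards, so set order is immaterial
  let counts : PySem.Dict String Int := enabled.foldl (fun (d : PySem.Dict String Int) t =>
    match PySem.Dict.get? pvTidToCat t with
    | some cat => PySem.Dict.modify d cat (0 : Int) (· + 1)
    | none => d) pvInitCounts
  let lines : List String := pvCats.foldl (fun lines p =>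
    let n := PySem.Dict.getD counts p.1 0
    if n ≠ 0 then lines ++ [pvLine p.1 n (p.2.length : Int)] else lines) []
  if lines ≠ [] then PySem.Str.join "\n" lines else "  (none)"

-- ===== PRECONDITION & SPEC =====
def Spec_active_category_summary (cfg : List (String × List String)) (out : String) : Prop := out = active_category_summary_alt cfg
instance (cfg : List (String × List String)) (out : String) : Decidable (Spec_active_category_summary cfg out) := by unfold Spec_active_category_summary; infer_instance

-- ===== CLAIM (what is proved, stated in full; the proofs are below) =====
def Claim_equal_active_category_summary : Prop := ∀ (cfg : List (String × List String)), Dom_active_category_summary cfg → Spec_active_category_summary cfg (active_category_summary cfg)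

-- ===== LEMMAS AND PROOFS =====

-- the reverse lookup answers exactly "which constant tid list contains t"
set_option maxHeartbeats 1000000 in
theorem pvTidToCat_spec (t : String) :
    PySem.Dict.get? pvTidToCat t =
      if t ∈ ["T01", "T02", "T03", "T04", "T05", "T06"] then some "admin"
      else if t ∈ ["T07", "T08", "T09", "T10"] then some "login"
      else if t ∈ ["T11", "T12", "T13", "T14"] then some "files"
      else if t ∈ ["T15", "T16", "T17", "T18"] then some "cms"
      else if t ∈ ["T19", "T20"] then some "error"
      else none := by
  by_cases h1 : t = "T01"
  · subst h1; decide
  by_cases h2 : t = "T02"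
  · subst h2; decide
  by_cases h3 : t = "T03"
  · subst h3; decide
  by_cases h4 : t = "T04"
  · subst h4; decide
  by_cases h5 : t = "T05"
  · subst h5; decide
  by_cases h6 : t = "T06"
  · subst h6; decide
  by_cases h7 : t = "T07"
  · subst h7; decide
  by_cases h8 : t = "T08"
  · subst h8; decide
  by_cases h9 : t = "T09"
  · subst h9; decide
  by_cases h10 : t = "T10"
  · subst h10; decide
  by_cases h11 : t = "T11"
  · subst h11; decide
  by_cases h12 : t = "T12"
  · subst h12; decide
  by_cases h13 : t = "T13"
  · subst h13; decide
  by_cases h14 : t = "T14"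
  · subst h14; decide
  by_cases h15 : t = "T15"
  · subst h15; decide
  by_cases h16 : t = "T16"
  · subst h16; decide
  by_cases h17 : t = "T17"
  · subst h17; decide
  by_cases h18 : t = "T18"
  · subst h18; decide
  by_cases h19 : t = "T19"
  · subst h19; decide
  by_cases h20 : t = "T20"
  · subst h20; decide
  have g1 : ("T01" == t) = false := by simp [Ne.symm h1]
  have g2 : ("T02" == t) = false := by simp [Ne.symm h2]
  have g3 : ("T03" == t) = false := by simp [Ne.symm h3]
  have g4 : ("T04" == t) = false := by simp [Ne.symm h4]
  have g5 : ("T05" == t) = false := by simp [Ne.symm h5]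
  have g6 : ("T06" == t) = false := by simp [Ne.symm h6]
  have g7 : ("T07" == t) = false := by simp [Ne.symm h7]
  have g8 : ("T08" == t) = false := by simp [Ne.symm h8]
  have g9 : ("T09" == t) = false := by simp [Ne.symm h9]
  have g10 : ("T10" == t) = false := by simp [Ne.symm h10]
  have g11 : ("T11" == t) = false := by simp [Ne.symm h11]
  have g12 : ("T12" == t) = false := by simp [Ne.symm h12]
  have g13 : ("T13" == t) = false := by simp [Ne.symm h13]
  have g14 : ("T14" == t) = false := by simp [Ne.symm h14]
  have g15 : ("T15" == t) = false := by simp [Ne.symm h15]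
  have g16 : ("T16" == t) = false := by simp [Ne.symm h16]
  have g17 : ("T17" == t) = false := by simp [Ne.symm h17]
  have g18 : ("T18" == t) = false := by simp [Ne.symm h18]
  have g19 : ("T19" == t) = false := by simp [Ne.symm h19]
  have g20 : ("T20" == t) = false := by simp [Ne.symm h20]
  simp [pvTidToCat, PySem.Dict.get?, List.find?, g1, g2, g3, g4, g5, g6, g7, g8, g9, g10, g11, g12, g13, g14, g15, g16, g17, g18, g19, g20, h1, h2, h3, h4, h5, h6, h7, h8, h9, h10, h11, h12, h13, h14, h15, h16, h17, h18, h19, h20]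

-- B's counting fold, characterised: slot c of the counts dict gains one per element mapped to c
theorem pv_fold_count (e : List String) (d : PySem.Dict String Int) (c : String) :
    PySem.Dict.getD (e.foldl (fun (d : PySem.Dict String Int) t =>
      match PySem.Dict.get? pvTidToCat t with
      | some cat => PySem.Dict.modify d cat (0 : Int) (· + 1)
      | none => d) d) c (0 : Int)
    = PySem.Dict.getD d c 0 + ((e.filter (fun t => PySem.Dict.get? pvTidToCat t == some c)).length : Int) := by
  induction e generalizing d with
  | nil => simp
  | cons t e ih =>
    simp only [List.foldl_cons, List.filter_cons]
    cases hg : PySem.Dict.get? pvTidToCat t with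
    | none => simp only; rw [ih]; simp
    | some cat =>
      by_cases hc : cat = c
      · subst hc
        simp only; rw [ih]
        simp [PySem.Dict.getD_modify_self]
        ring
      · simp only; rw [ih]
        rw [PySem.Dict.getD_modify_of_ne]
        · simp [hc]
        · exact Ne.symm hc

-- counting an intersection from either side (both lists without duplicates)
theorem pv_inter_count (tids e : List String) (h1 : tids.Nodup) (h2 : e.Nodup) :
    (tids.filter (fun t => decide (t ∈ e))).length = (e.filter (fun t => decide (t ∈ tids))).length := by
  apply List.Perm.length_eq
  apply (List.perm_ext_iff_of_nodup (h1.filter _) (h2.filter _)).mpr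
  intro a
  simp [List.mem_filter, and_comm]

-- per-category bridge: A's filtered-list length equals B's counter slot
theorem pv_cat_count (raw : List String) (tids : List String) (c : String)
    (hnd : tids.Nodup)
    (hpred : ∀ t, (PySem.Dict.get? pvTidToCat t == some c) = decide (t ∈ tids))
    (h0 : PySem.Dict.getD pvInitCounts c 0 = 0) :
    ((tids.filter (fun t => PySem.Set.contains (PySem.Set.ofList raw) t)).length : Int)
      = PySem.Dict.getD ((PySem.Set.ofList raw).foldl (fun (d : PySem.Dict String Int) t =>
          match PySem.Dict.get? pvTidToCat t with
          | some cat => PySem.Dict.modify d cat (0 : Int) (· + 1)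
          | none => d) pvInitCounts) c 0 := by
  rw [pv_fold_count, h0, zero_add]
  rw [List.filter_congr (l := PySem.Set.ofList raw) (fun t _ => hpred t)]
  rw [List.filter_congr (l := tids)
      (q := fun t => decide (t ∈ (PySem.Set.ofList raw : List String)))
      (fun t _ => by by_cases h : t ∈ (PySem.Set.ofList raw : List String) <;>
        simp [h])]
  exact_mod_cast congrArg Nat.cast
    (pv_inter_count tids (PySem.Set.ofList raw) hnd (PySem.Set.nodup_ofList raw))

theorem pv_pred_admin (t : String) :
    (PySem.Dict.get? pvTidToCat t == some "admin") = decide (t ∈ ["T01", "T02", "T03", "T04", "T05", "T06"]) := by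
  rw [pvTidToCat_spec]
  by_cases h : t ∈ ["T01", "T02", "T03", "T04", "T05", "T06"]
  · simp only [List.mem_cons, List.not_mem_nil, or_false] at h
    rcases h with rfl|rfl|rfl|rfl|rfl|rfl <;> decide
  · split_ifs <;> simp_all
theorem pv_pred_login (t : String) :
    (PySem.Dict.get? pvTidToCat t == some "login") = decide (t ∈ ["T07", "T08", "T09", "T10"]) := by
  rw [pvTidToCat_spec]
  by_cases h : t ∈ ["T07", "T08", "T09", "T10"]
  · simp only [List.mem_cons, List.not_mem_nil, or_false] at h
    rcases h with rfl|rfl|rfl|rfl <;> decide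
  · split_ifs <;> simp_all
theorem pv_pred_files (t : String) :
    (PySem.Dict.get? pvTidToCat t == some "files") = decide (t ∈ ["T11", "T12", "T13", "T14"]) := by
  rw [pvTidToCat_spec]
  by_cases h : t ∈ ["T11", "T12", "T13", "T14"]
  · simp only [List.mem_cons, List.not_mem_nil, or_false] at h
    rcases h with rfl|rfl|rfl|rfl <;> decide
  · split_ifs <;> simp_all
theorem pv_pred_cms (t : String) :
    (PySem.Dict.get? pvTidToCat t == some "cms") = decide (t ∈ ["T15", "T16", "T17", "T18"]) := by
  rw [pvTidToCat_spec]
  by_cases h : t ∈ ["T15", "T16", "T17", "T18"]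
  · simp only [List.mem_cons, List.not_mem_nil, or_false] at h
    rcases h with rfl|rfl|rfl|rfl <;> decide
  · split_ifs <;> simp_all
theorem pv_pred_error (t : String) :
    (PySem.Dict.get? pvTidToCat t == some "error") = decide (t ∈ ["T19", "T20"]) := by
  rw [pvTidToCat_spec]
  by_cases h : t ∈ ["T19", "T20"]
  · simp only [List.mem_cons, List.not_mem_nil, or_false] at h
    rcases h with rfl|rfl <;> decide
  · split_ifs <;> simp_all

-- ===== VERDICT (by name: the statement is the Claim_ definition above) =====
theorem active_category_summary_spec : Claim_equal_active_category_summary := by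
  intro cfg _
  unfold Spec_active_category_summary active_category_summary active_category_summary_alt
  simp only
  set raw := PySem.Dict.getD (PySem.Dict.mk cfg) "templates" [] with hraw
  have hadmin := pv_cat_count raw _ _ (by decide) pv_pred_admin (by decide)
  have hlogin := pv_cat_count raw _ _ (by decide) pv_pred_login (by decide)
  have hfiles := pv_cat_count raw _ _ (by decide) pv_pred_files (by decide)
  have hcms := pv_cat_count raw _ _ (by decide) pv_pred_cms (by decide)
  have herror := pv_cat_count raw _ _ (by decide) pv_pred_error (by decide)
  have hstep : ∀ (lines : List String), ∀ p ∈ pvCats,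
      (if p.2.filter (fun t => PySem.Set.contains (PySem.Set.ofList raw) t) ≠ [] then
        lines ++ [pvLine p.1 ((p.2.filter (fun t => PySem.Set.contains (PySem.Set.ofList raw) t)).length : Int) (p.2.length : Int)]
       else lines)
      = (if PySem.Dict.getD ((PySem.Set.ofList raw).foldl (fun (d : PySem.Dict String Int) t =>
            match PySem.Dict.get? pvTidToCat t with
            | some cat => PySem.Dict.modify d cat (0 : Int) (· + 1)
            | none => d) pvInitCounts) p.1 0 ≠ 0 then
         lines ++ [pvLine p.1 (PySem.Dict.getD ((PySem.Set.ofList raw).foldl (fun (d : PySem.Dict String Int) t =>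
            match PySem.Dict.get? pvTidToCat t with
            | some cat => PySem.Dict.modify d cat (0 : Int) (· + 1)
            | none => d) pvInitCounts) p.1 0) (p.2.length : Int)]
       else lines) := by
    intro lines p hp
    have key : ((p.2.filter (fun t => PySem.Set.contains (PySem.Set.ofList raw) t)).length : Int)
        = PySem.Dict.getD ((PySem.Set.ofList raw).foldl (fun (d : PySem.Dict String Int) t =>
            match PySem.Dict.get? pvTidToCat t with
            | some cat => PySem.Dict.modify d cat (0 : Int) (· + 1)
            | none => d) pvInitCounts) p.1 0 := by
      fin_cases hp
      · exact hadmin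
      · exact hlogin
      · exact hfiles
      · exact hcms
      · exact herror
    simp only [← key]
    by_cases hne : p.2.filter (fun t => PySem.Set.contains (PySem.Set.ofList raw) t) = []
    · simp
    · have hlen : (p.2.filter (fun t => PySem.Set.contains (PySem.Set.ofList raw) t)).length ≠ 0 := by
        simpa [List.length_eq_zero_iff] using hne
      simp only [ne_eq, hne, not_false_eq_true, if_true]
      rw [if_pos]
      exact_mod_cast hlen
  have hL := PySem.List.foldl_congr_mem pvCats _ _ ([] : List String)
    (fun lines p hp => hstep lines p hp)
  rw [hL]
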